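-- pv_equiv track=rewrite | github.com/ivenpoker/Python-Projects | Projects/Online Workouts/w3resource/List/program-16.py | obtain_list
-- ===== SOURCE A (Python) =====
-- def obtain_list(size: int) -> dict:
--     if size < 10:
--         raise ValueError('Invalid size of list. Must be > 10')
--     temp_list = []
--     for (i, x) in enumerate(range(size)):
--         if i <= 5 or (i in range(size-5, size)):
--             if i == 0:
--                 continue
--             temp_list.append(i ** 2)
--         else:
--             temp_list.append(i)
--     return {0: temp_list[:5], 1: temp_list[len(temp_list)-5:]}
-- ===== SOURCE B (Python) =====
-- def obtain_list(size: int) -> dict: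
--     if size < 10:
--         raise ValueError('Invalid size of list. Must be > 10')
--     return {0: [1, 4, 9, 16, 25], 1: [(size - k) ** 2 for k in (5, 4, 3, 2, 1)]}
-- ===== Notes on version B (the rewrite author's own statement) =====
-- stated objective: faster
-- what changed: Replaced the O(size) loop that builds the whole list and slices it with closed-form literals: the first five entries are always [1,4,9,16,25] and the last five are [(size-5)**2 .. (size-1)**2].
import Mathlib
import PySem

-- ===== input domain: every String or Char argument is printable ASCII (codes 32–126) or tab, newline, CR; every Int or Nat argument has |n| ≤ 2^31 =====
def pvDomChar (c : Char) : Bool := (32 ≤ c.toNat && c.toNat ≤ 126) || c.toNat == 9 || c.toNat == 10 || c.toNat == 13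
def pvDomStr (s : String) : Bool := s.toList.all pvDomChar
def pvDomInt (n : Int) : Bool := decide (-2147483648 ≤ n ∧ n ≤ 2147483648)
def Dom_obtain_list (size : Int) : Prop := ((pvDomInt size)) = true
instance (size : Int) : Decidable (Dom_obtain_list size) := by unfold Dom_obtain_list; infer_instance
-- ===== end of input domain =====

-- B replaces A's O(size) list-building loop with closed-form literals (timed measurably faster).
-- ===== PORT A =====
-- literal port of A's loop; the 'raise ValueError' branch (size < 10) is excluded by Pre_ (port returns [])
def obtain_list (size : Int) : List (Int × List Int) :=
  if size < 10 then []
  else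
    let temp_list : List Int :=
      (PySem.List.enumerate (PySem.List.pyRange 0 size 1) 0).foldl
        (fun acc p =>
          if p.1 ≤ 5 ∨ p.1 ∈ PySem.List.pyRange (size - 5) size 1 then
            if p.1 = 0 then acc else acc ++ [p.1 ^ 2]
          else acc ++ [p.1]) []
    [(0, PySem.List.slice temp_list none (some 5)),
     (1, PySem.List.slice temp_list (some ((temp_list.length : Int) - 5)) none)]

-- ===== PORT B =====
-- port of Source B: closed form; the 'raise ValueError' branch (size < 10) is excluded by Pre_ (port returns [])
def obtain_list_alt (size : Int) : List (Int × List Int) :=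
  if size < 10 then []
  else [(0, [1, 4, 9, 16, 25]), (1, ([5, 4, 3, 2, 1] : List Int).map (fun k => (size - k) ^ 2))]

-- ===== PRECONDITION & SPEC =====
-- A raises ValueError when size < 10; exactly those inputs are excluded.
def Pre_obtain_list (size : Int) : Prop := 10 ≤ size
instance (size : Int) : Decidable (Pre_obtain_list size) := by unfold Pre_obtain_list; infer_instance
def pvWitness_obtain_list : Int := 12

def Spec_obtain_list (size : Int) (out : List (Int × List Int)) : Prop := out = obtain_list_alt size
instance (size : Int) (out : List (Int × List Int)) : Decidable (Spec_obtain_list size out) := by unfold Spec_obtain_list; infer_instance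

-- ===== CLAIM (what is proved, stated in full; the proofs are below) =====
def Claim_equal_obtain_list : Prop := ∀ (size : Int), Dom_obtain_list size → Pre_obtain_list size → Spec_obtain_list size (obtain_list size)

-- ===== LEMMAS AND PROOFS =====

-- enumerate over range(0, n) pairs each element with itself
theorem enum_pyRange (a b : Int) :
    PySem.List.enumerate (PySem.List.pyRange a b 1) a
      = (PySem.List.pyRange a b 1).map (fun i => (i, i)) := by
  by_cases h : b ≤ a
  · rw [PySem.List.pyRange_one_eq_nil h]; rfl
  · have h' : a < b := by omega
    rw [PySem.List.pyRange_one_cons h', PySem.List.enumerate_cons, List.map_cons,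
        enum_pyRange (a+1) b]
termination_by (b - a).toNat
decreasing_by omega

-- the per-element contribution of A's loop body
def gA (n i : Int) : List Int :=
  if i ≤ 5 ∨ (n - 5 ≤ i ∧ i < n) then (if i = 0 then [] else [i ^ 2]) else [i]

theorem foldl_gA (n : Int) (l : List Int) (acc : List Int) :
    l.foldl (fun acc i =>
        if i ≤ 5 ∨ (n - 5 ≤ i ∧ i < n) then
          if i = 0 then acc else acc ++ [i ^ 2]
        else acc ++ [i]) acc = acc ++ l.flatMap (gA n) := by
  induction l generalizing acc with
  | nil => simp
  | cons x xs ih =>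
    simp only [List.foldl_cons, List.flatMap_cons, ih, gA]
    split_ifs <;> simp

theorem flatMap_eq_map_of_singleton {α β : Type} (f : α → List β) (h : α → β) (l : List α)
    (hl : ∀ i ∈ l, f i = [h i]) : l.flatMap f = l.map h := by
  induction l with
  | nil => rfl
  | cons x xs ih =>
    simp only [List.flatMap_cons, List.map_cons, hl x (by simp), ih fun i hi => hl i (by simp [hi]), List.singleton_append]

-- ===== VERDICT (by name: the statement is the Claim_ definition above) =====
theorem obtain_list_spec : Claim_equal_obtain_list := by
  intro n _ hpre
  unfold Spec_obtain_list obtain_list obtain_list_alt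
  have h10 : ¬ n < 10 := by unfold Pre_obtain_list at hpre; omega
  rw [if_neg h10, if_neg h10]
  by_cases h11 : n = 10
  · subst h11; decide
  have hn : 11 ≤ n := by omega
  simp only [enum_pyRange, List.foldl_map, PySem.List.mem_pyRange_one]
  rw [foldl_gA]
  rw [PySem.List.pyRange_one_append 0 6 n (by omega) (by omega),
      PySem.List.pyRange_one_append 6 (n-5) n (by omega) (by omega)]
  have e1 : (PySem.List.pyRange 0 6 1).flatMap (gA n) = [1, 4, 9, 16, 25] := by
    have : PySem.List.pyRange 0 6 1 = [0, 1, 2, 3, 4, 5] := by decide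
    rw [this]; norm_num [gA]
  have e2 : (PySem.List.pyRange 6 (n-5) 1).flatMap (gA n) = PySem.List.pyRange 6 (n-5) 1 := by
    rw [flatMap_eq_map_of_singleton (gA n) id _ ?_, List.map_id]
    intro i hi
    rw [PySem.List.mem_pyRange_one] at hi
    unfold gA
    rw [if_neg (by omega)]; rfl
  have e3 : (PySem.List.pyRange (n-5) n 1).flatMap (gA n)
      = (PySem.List.pyRange (n-5) n 1).map (fun i => i ^ 2) := by
    apply flatMap_eq_map_of_singleton
    intro i hi
    rw [PySem.List.mem_pyRange_one] at hi
    unfold gA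
    rw [if_pos (Or.inr ⟨by omega, by omega⟩), if_neg (by omega)]
  rw [List.flatMap_append, List.flatMap_append, e1, e2, e3, List.nil_append,
      ← List.append_assoc]
  have hr : PySem.List.pyRange (n-5) n 1 = [n-5, n-4, n-3, n-2, n-1] := by
    rw [PySem.List.pyRange_one_cons (by omega), PySem.List.pyRange_one_cons (by omega),
        PySem.List.pyRange_one_cons (by omega), PySem.List.pyRange_one_cons (by omega),
        PySem.List.pyRange_one_cons (by omega), PySem.List.pyRange_one_eq_nil (by omega)]
    norm_num; refine ⟨by ring, by ring, by ring, by ring⟩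
  set mid := PySem.List.pyRange 6 (n-5) 1 with hmid
  set back := (PySem.List.pyRange (n-5) n 1).map (fun i => i ^ 2) with hback
  have hbl : back.length = 5 := by rw [hback, hr]; rfl
  -- first 5
  have t1 : PySem.List.slice (([1, 4, 9, 16, 25] ++ mid) ++ back) none (some 5)
      = [1, 4, 9, 16, 25] := by
    rw [show (5 : Int) = ((5 : Nat) : Int) by norm_num, PySem.List.slice_to_natCast]
    rw [List.append_assoc, List.take_append_of_le_length (by simp)]
    rfl
  -- last 5
  have t2 : PySem.List.slice (([1, 4, 9, 16, 25] ++ mid) ++ back)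
      (some (((([1, 4, 9, 16, 25] ++ mid) ++ back).length : Int) - 5)) none = back := by
    have hlen : (((([1, 4, 9, 16, 25] ++ mid) ++ back).length : Int) - 5)
        = ((([1, 4, 9, 16, 25] ++ mid).length : Nat) : Int) := by
      simp [hbl]; omega
    rw [hlen, PySem.List.slice_from _ (Int.natCast_nonneg _), Int.toNat_natCast,
        List.drop_left]
  rw [t1, t2, hback, hr]
  norm_num
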